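-- pv_equiv track=rewrite | github.com/MusabAlosaimi/Data-Classification1 | streamlit_app.py | get_impact_summary
-- ===== SOURCE A (Python) =====
-- from typing import Dict, Any
--
-- def get_impact_summary(assessment: Dict[str, Any]) -> Dict[str, int]:
--     """Get summary of impact responses."""
--     all_responses = []
--     for category in assessment.values():
--         for subcategory in category.values():
--             for response in subcategory.values():
--                 all_responses.append(response)
--
--     return {
--         'high': all_responses.count('high'),
--         'medium': all_responses.count('medium'),
--         'low': all_responses.count('low'),
--         'none': all_responses.count('none'),
--         'total': len(all_responses)
--     }
-- ===== SOURCE B (Python) =====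
-- def get_impact_summary(assessment):
--     """Get summary of impact responses."""
--     labels = ('high', 'medium', 'low', 'none')
--
--     def summarize(node):
--         # recursive map-reduce: a summary is a 5-vector; dicts sum their children
--         if isinstance(node, dict):
--             vec = (0, 0, 0, 0, 0)
--             for child in node.values():
--                 vec = tuple(x + y for x, y in zip(vec, summarize(child)))
--             return vec
--         return tuple(int(node == lab) for lab in labels) + (1,)
--
--     h, m, l, n, t = summarize(assessment)
--     return {'high': h, 'medium': m, 'low': l, 'none': n, 'total': t}
-- ===== Notes on version B (the rewrite author's own statement) =====
-- stated objective: alternative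
-- what changed: Replaces the flatten-then-four-.count()-scans approach with a recursive map-reduce: each response is mapped to a unit 5-vector (one-hot label plus total) and dict nodes sum their children's vectors componentwise; no flat list is ever built.
import Mathlib
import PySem

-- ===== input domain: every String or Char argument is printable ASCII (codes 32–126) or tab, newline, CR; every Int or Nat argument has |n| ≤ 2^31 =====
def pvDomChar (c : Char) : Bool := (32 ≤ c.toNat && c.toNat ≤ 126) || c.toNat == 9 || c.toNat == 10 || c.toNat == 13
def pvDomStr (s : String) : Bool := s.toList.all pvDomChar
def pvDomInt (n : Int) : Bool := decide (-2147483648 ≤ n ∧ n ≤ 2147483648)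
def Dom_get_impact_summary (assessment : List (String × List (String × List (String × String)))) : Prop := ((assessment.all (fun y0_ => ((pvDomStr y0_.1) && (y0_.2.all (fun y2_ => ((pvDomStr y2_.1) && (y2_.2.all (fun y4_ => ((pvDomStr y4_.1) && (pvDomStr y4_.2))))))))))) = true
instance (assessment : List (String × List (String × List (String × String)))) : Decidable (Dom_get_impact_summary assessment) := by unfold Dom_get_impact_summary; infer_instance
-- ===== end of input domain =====

-- B changes the algorithm: recursive map-reduce summing one-hot 5-vectors, no flat list; same return value.

-- ===== PORT A =====
def get_impact_summary (assessment : List (String × List (String × List (String × String)))) : List (String × Int) :=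
  let all_responses : List String :=
    assessment.foldl (fun acc category =>
      category.2.foldl (fun acc subcategory =>
        subcategory.2.foldl (fun acc response => acc ++ [response.2]) acc) acc) []
  [("high", (PySem.List.count all_responses "high" : Int)),
   ("medium", (PySem.List.count all_responses "medium" : Int)),
   ("low", (PySem.List.count all_responses "low" : Int)),
   ("none", (PySem.List.count all_responses "none" : Int)),
   ("total", (all_responses.length : Int))]

-- ===== PORT B =====
-- B is generic recursion on the node; the Lean type fixes depth 3, so the recursive
-- `summarize` becomes one function per level: a leaf maps to a unit 5-vector, a dict
-- node folds componentwise vector addition over its children.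
def pvVecAdd (a b : Int × Int × Int × Int × Int) : Int × Int × Int × Int × Int :=
  (a.1 + b.1, a.2.1 + b.2.1, a.2.2.1 + b.2.2.1, a.2.2.2.1 + b.2.2.2.1, a.2.2.2.2 + b.2.2.2.2)

def pvLeafVec (r : String) : Int × Int × Int × Int × Int :=
  ((if r = "high" then 1 else 0), (if r = "medium" then 1 else 0),
   (if r = "low" then 1 else 0), (if r = "none" then 1 else 0), 1)

def pvSumSub (sub : List (String × String)) : Int × Int × Int × Int × Int :=
  sub.foldl (fun vec child => pvVecAdd vec (pvLeafVec child.2)) (0, 0, 0, 0, 0)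

def pvSumCat (cat : List (String × List (String × String))) : Int × Int × Int × Int × Int :=
  cat.foldl (fun vec child => pvVecAdd vec (pvSumSub child.2)) (0, 0, 0, 0, 0)

def get_impact_summary_alt (assessment : List (String × List (String × List (String × String)))) : List (String × Int) :=
  let v := assessment.foldl (fun vec child => pvVecAdd vec (pvSumCat child.2)) (0, 0, 0, 0, 0)
  [("high", v.1), ("medium", v.2.1), ("low", v.2.2.1), ("none", v.2.2.2.1), ("total", v.2.2.2.2)]

-- ===== PRECONDITION & SPEC =====
def Spec_get_impact_summary (assessment : List (String × List (String × List (String × String)))) (out : List (String × Int)) : Prop := out = get_impact_summary_alt assessment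
instance (assessment : List (String × List (String × List (String × String)))) (out : List (String × Int)) : Decidable (Spec_get_impact_summary assessment out) := by unfold Spec_get_impact_summary; infer_instance

-- ===== CLAIM (what is proved, stated in full; the proofs are below) =====
def Claim_equal_get_impact_summary : Prop := ∀ (assessment : List (String × List (String × List (String × String)))), Dom_get_impact_summary assessment → Spec_get_impact_summary assessment (get_impact_summary assessment)

-- ===== LEMMAS AND PROOFS =====

-- the canonical summary vector of a list of responses
def pvVec (l : List String) : Int × Int × Int × Int × Int :=
  ((l.count "high" : Int), (l.count "medium" : Int), (l.count "low" : Int),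
   (l.count "none" : Int), (l.length : Int))

theorem pvLeafVec_eq (r : String) : pvLeafVec r = pvVec [r] := by
  by_cases h1 : r = "high" <;> by_cases h2 : r = "medium" <;> by_cases h3 : r = "low" <;>
    by_cases h4 : r = "none" <;>
    simp_all [pvLeafVec, pvVec]

theorem pvVec_append (l l' : List String) :
    pvVec (l ++ l') = pvVecAdd (pvVec l) (pvVec l') := by
  simp [pvVec, pvVecAdd, List.count_append, List.length_append]

-- generic fold shape: summing f over xs, where f x = pvVec (g x)
theorem pvFold_vec {α : Type} (g : α → List String) (xs : List α)
    (v : Int × Int × Int × Int × Int) (l : List String) (hv : v = pvVec l) :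
    xs.foldl (fun vec x => pvVecAdd vec (pvVec (g x))) v
      = pvVec (l ++ xs.flatMap g) := by
  induction xs generalizing v l with
  | nil => simp [hv]
  | cons x xs ih =>
    simp only [List.foldl_cons, List.flatMap_cons]
    rw [ih _ (l ++ g x) (by rw [hv, pvVec_append]), List.append_assoc]

theorem pvSumSub_eq (sub : List (String × String)) :
    pvSumSub sub = pvVec (sub.flatMap (fun r => [r.2])) := by
  have := pvFold_vec (fun r : String × String => [r.2]) sub (0,0,0,0,0) [] rfl
  simpa [pvSumSub, pvLeafVec_eq] using this

theorem pvSumCat_eq (cat : List (String × List (String × String))) :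
    pvSumCat cat = pvVec (cat.flatMap (fun s => s.2.flatMap (fun r => [r.2]))) := by
  have := pvFold_vec (fun s : String × List (String × String) =>
    s.2.flatMap (fun r => [r.2])) cat (0,0,0,0,0) [] rfl
  simpa [pvSumCat, pvSumSub_eq] using this

theorem pvTop_eq (a : List (String × List (String × List (String × String)))) :
    a.foldl (fun vec child => pvVecAdd vec (pvSumCat child.2)) (0,0,0,0,0)
      = pvVec (a.flatMap (fun c => c.2.flatMap (fun s => s.2.flatMap (fun r => [r.2])))) := by
  have := pvFold_vec (fun c : String × List (String × List (String × String)) =>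
    c.2.flatMap (fun s => s.2.flatMap (fun r => [r.2]))) a (0,0,0,0,0) [] rfl
  simpa [pvSumCat_eq] using this

-- A's accumulated list is exactly that flattening
theorem pvA_sub (ss : List (String × List (String × String))) (acc : List String) :
    ss.foldl (fun acc subcategory =>
      subcategory.2.foldl (fun acc response => acc ++ [response.2]) acc) acc
      = acc ++ ss.flatMap (fun s => s.2.flatMap (fun r => [r.2])) := by
  induction ss generalizing acc with
  | nil => simp
  | cons s ss ih =>
    simp only [List.foldl_cons, List.flatMap_cons]
    rw [PySem.List.foldl_append_eq_flatMap, ih, List.append_assoc]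

theorem pvA_list (a : List (String × List (String × List (String × String))))
    (acc : List String) :
    a.foldl (fun acc category =>
      category.2.foldl (fun acc subcategory =>
        subcategory.2.foldl (fun acc response => acc ++ [response.2]) acc) acc) acc
      = acc ++ a.flatMap (fun c => c.2.flatMap (fun s => s.2.flatMap (fun r => [r.2]))) := by
  induction a generalizing acc with
  | nil => simp
  | cons c cs ih =>
    simp only [List.foldl_cons, List.flatMap_cons]
    rw [pvA_sub, ih, List.append_assoc]

-- ===== VERDICT (by name: the statement is the Claim_ definition above) =====
theorem get_impact_summary_spec : Claim_equal_get_impact_summary := by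
  intro assessment _
  unfold Spec_get_impact_summary get_impact_summary get_impact_summary_alt
  rw [pvA_list, pvTop_eq]
  simp [pvVec, PySem.List.count_eq]
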